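-- pv_equiv track=rewrite | github.com/kurosawa4434/checkio-mission-square-board | verification/tests.py | solution
-- ===== SOURCE A (Python) =====
-- def solution(edge, you, die):
--     d = [[0, -1], [-1, 0], [0, 1], [1, 0]]
--     cycle = edge - 1
--     y, x = cycle, cycle
--     dic = [[y, x]]
--     for i in range(cycle * 4 - 1):
--         dy, dx = d[i // cycle]
--         y += dy
--         x += dx
--         dic.append([y, x])
--     return dic[(you+die) % (cycle*4)]
-- ===== SOURCE B (Python) =====
-- def solution(edge, you, die):
--     cycle = edge - 1
--     side, off = divmod((you + die) % (4 * cycle), cycle)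
--     if side == 0:
--         return [cycle, cycle - off]
--     if side == 1:
--         return [cycle - off, 0]
--     if side == 2:
--         return [0, off]
--     return [off, cycle]
-- ===== Notes on version B (the rewrite author's own statement) =====
-- stated objective: faster
-- what changed: B computes the perimeter position directly with divmod on the index (segment number and offset) instead of building the whole 4*(edge-1)-cell perimeter list and indexing it.
-- outside the precondition, e.g. on solution(0, -1, 0): A returns [-1, -1], B returns [-1, 0]; on solution(0, 0, 0): A returns [-1, -1], B returns [-1, -1]
import Mathlib
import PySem

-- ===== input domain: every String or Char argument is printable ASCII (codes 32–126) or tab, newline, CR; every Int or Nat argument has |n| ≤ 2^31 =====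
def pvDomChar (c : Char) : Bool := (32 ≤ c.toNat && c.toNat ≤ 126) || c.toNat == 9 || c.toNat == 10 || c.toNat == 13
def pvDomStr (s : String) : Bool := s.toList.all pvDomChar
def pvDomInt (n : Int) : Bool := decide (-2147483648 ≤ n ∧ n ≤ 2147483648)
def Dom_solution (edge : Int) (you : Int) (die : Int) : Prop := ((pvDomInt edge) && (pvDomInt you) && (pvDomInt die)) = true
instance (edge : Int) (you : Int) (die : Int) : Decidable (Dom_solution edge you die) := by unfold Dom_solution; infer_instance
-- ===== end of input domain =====

-- B replaces A's O(edge) perimeter-list construction by divmod arithmetic on the index (objective: faster).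

-- ===== PORT A =====
-- loop body of A's 'for i in range(cycle * 4 - 1)' (state: y, x, dic)
def solutionStep (cycle : Int) (st : Int × Int × List (List Int)) (i : Int) : Int × Int × List (List Int) :=
  let d : List (List Int) := [[0, -1], [-1, 0], [0, 1], [1, 0]]
  let dydx := PySem.List.pyGetD d (PySem.Int.floordiv i cycle) []
  let dy := PySem.List.pyGetD dydx 0 0
  let dx := PySem.List.pyGetD dydx 1 0
  let y := st.1 + dy
  let x := st.2.1 + dx
  (y, x, st.2.2 ++ [[y, x]])

def solution (edge : Int) (you : Int) (die : Int) : List Int :=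
  let cycle := edge - 1
  let st := (PySem.List.pyRange 0 (cycle * 4 - 1) 1).foldl (solutionStep cycle)
              (cycle, cycle, [[cycle, cycle]])
  PySem.List.pyGetD st.2.2 (PySem.Int.mod (you + die) (cycle * 4)) []

-- ===== PORT B =====
def solution_alt (edge : Int) (you : Int) (die : Int) : List Int :=
  let cycle := edge - 1
  let n := PySem.Int.mod (you + die) (4 * cycle)
  let side := PySem.Int.floordiv n cycle
  let off := PySem.Int.mod n cycle
  if side = 0 then [cycle, cycle - off]
  else if side = 1 then [cycle - off, 0]
  else if side = 2 then [0, off]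
  else [off, cycle]

-- ===== PRECONDITION & SPEC =====
-- Pre_ excludes degenerate boards edge ≤ 1, where A raises ZeroDivisionError (edge = 1) or
-- IndexError (most edge ≤ 0 inputs) except for a few non-positive-edge inputs where A's
-- negative-index wraparound on its one-element list accidentally returns [edge-1, edge-1];
-- no square board exists there, so neither value is specified.
def Pre_solution (edge : Int) (you : Int) (die : Int) : Prop := 2 ≤ edge
instance (edge : Int) (you : Int) (die : Int) : Decidable (Pre_solution edge you die) := by unfold Pre_solution; infer_instance
def pvWitness_solution : Int × Int × Int := (3, 0, 1)

def Spec_solution (edge : Int) (you : Int) (die : Int) (out : List Int) : Prop := out = solution_alt edge you die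
instance (edge : Int) (you : Int) (die : Int) (out : List Int) : Decidable (Spec_solution edge you die out) := by unfold Spec_solution; infer_instance

-- ===== CLAIM (what is proved, stated in full; the proofs are below) =====
def Claim_equal_solution : Prop := ∀ (edge : Int) (you : Int) (die : Int), Dom_solution edge you die → Pre_solution edge you die → Spec_solution edge you die (solution edge you die)

-- ===== LEMMAS AND PROOFS =====

-- closed form of the perimeter position A's loop has reached after k steps
def pvPosY (c k : Int) : Int := if k ≤ c then c else if k ≤ 2*c then 2*c - k else if k ≤ 3*c then 0 else k - 3*c
def pvPosX (c k : Int) : Int := if k ≤ c then c - k else if k ≤ 2*c then 0 else if k ≤ 3*c then k - 2*c else c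

lemma pvStep_eq (c : Int) (hc : 1 ≤ c) (m : Int) (h0 : 0 ≤ m) (h1 : m ≤ 4*c - 2) (L : List (List Int)) :
    solutionStep c (pvPosY c m, pvPosX c m, L) m
      = (pvPosY c (m+1), pvPosX c (m+1), L ++ [[pvPosY c (m+1), pvPosX c (m+1)]]) := by
  have hcpos : (0:Int) < c := by omega
  rcases lt_or_ge m c with h | h
  · have hq : PySem.Int.floordiv m c = 0 := by
      rw [PySem.Int.floordiv_eq_iff_of_pos hcpos]; constructor <;> nlinarith
    simp only [solutionStep, hq]
    have hy : pvPosY c (m+1) = pvPosY c m + 0 := by unfold pvPosY; split_ifs <;> omega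
    have hx : pvPosX c (m+1) = pvPosX c m + (-1) := by unfold pvPosX; split_ifs <;> omega
    simp only [show PySem.List.pyGetD ([[0, -1], [-1, 0], [0, 1], [1, 0]] : List (List Int)) 0 [] = [0,-1] from by decide]
    simp only [show PySem.List.pyGetD ([0,-1] : List Int) 0 0 = 0 from by decide,
               show PySem.List.pyGetD ([0,-1] : List Int) 1 0 = -1 from by decide]
    rw [hy, hx]
  · rcases lt_or_ge m (2*c) with h2 | h2
    · have hq : PySem.Int.floordiv m c = 1 := by
        rw [PySem.Int.floordiv_eq_iff_of_pos hcpos]; constructor <;> nlinarith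
      simp only [solutionStep, hq]
      have hy : pvPosY c (m+1) = pvPosY c m + (-1) := by unfold pvPosY; split_ifs <;> omega
      have hx : pvPosX c (m+1) = pvPosX c m + 0 := by unfold pvPosX; split_ifs <;> omega
      simp only [show PySem.List.pyGetD ([[0, -1], [-1, 0], [0, 1], [1, 0]] : List (List Int)) 1 [] = [-1,0] from by decide]
      simp only [show PySem.List.pyGetD ([-1,0] : List Int) 0 0 = -1 from by decide,
                 show PySem.List.pyGetD ([-1,0] : List Int) 1 0 = 0 from by decide]
      rw [hy, hx]
    · rcases lt_or_ge m (3*c) with h3 | h3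
      · have hq : PySem.Int.floordiv m c = 2 := by
          rw [PySem.Int.floordiv_eq_iff_of_pos hcpos]; constructor <;> nlinarith
        simp only [solutionStep, hq]
        have hy : pvPosY c (m+1) = pvPosY c m + 0 := by unfold pvPosY; split_ifs <;> omega
        have hx : pvPosX c (m+1) = pvPosX c m + 1 := by unfold pvPosX; split_ifs <;> omega
        simp only [show PySem.List.pyGetD ([[0, -1], [-1, 0], [0, 1], [1, 0]] : List (List Int)) 2 [] = [0,1] from by decide]
        simp only [show PySem.List.pyGetD ([0,1] : List Int) 0 0 = 0 from by decide,
                   show PySem.List.pyGetD ([0,1] : List Int) 1 0 = 1 from by decide]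
        rw [hy, hx]
      · have hq : PySem.Int.floordiv m c = 3 := by
          rw [PySem.Int.floordiv_eq_iff_of_pos hcpos]; constructor <;> nlinarith
        simp only [solutionStep, hq]
        have hy : pvPosY c (m+1) = pvPosY c m + 1 := by unfold pvPosY; split_ifs <;> omega
        have hx : pvPosX c (m+1) = pvPosX c m + 0 := by unfold pvPosX; split_ifs <;> omega
        simp only [show PySem.List.pyGetD ([[0, -1], [-1, 0], [0, 1], [1, 0]] : List (List Int)) 3 [] = [1,0] from by decide]
        simp only [show PySem.List.pyGetD ([1,0] : List Int) 0 0 = 1 from by decide,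
                   show PySem.List.pyGetD ([1,0] : List Int) 1 0 = 0 from by decide]
        rw [hy, hx]

lemma pvLoop_inv (c : Int) (hc : 1 ≤ c) (M : Nat) (hM : (M : Int) ≤ 4*c - 1) :
    (PySem.List.pyRange 0 (M : Int) 1).foldl (solutionStep c) (c, c, [[c, c]])
      = (pvPosY c M, pvPosX c M,
         (List.range (M+1)).map (fun j : Nat => [pvPosY c (j : Int), pvPosX c (j : Int)])) := by
  induction M with
  | zero =>
      rw [PySem.List.pyRange_one_eq_nil (by norm_num)]
      have hy : pvPosY c 0 = c := by unfold pvPosY; split_ifs <;> omega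
      have hx : pvPosX c 0 = c := by unfold pvPosX; split_ifs <;> omega
      simp [hy, hx]
  | succ M ih =>
      have hM' : (M : Int) ≤ 4*c - 1 := by push_cast at hM ⊢; omega
      have hstep : (M : Int) ≤ 4*c - 2 := by push_cast at hM; omega
      have hcast : ((M + 1 : Nat) : Int) = (M : Int) + 1 := by push_cast; ring
      rw [hcast, PySem.List.pyRange_one_succ_right (by positivity), List.foldl_append,
          ih hM']
      simp only [List.foldl_cons, List.foldl_nil]
      rw [pvStep_eq c hc (M : Int) (by positivity) hstep]
      simp [List.range_succ, hcast]

lemma pvAlt_eq (c n : Int) (hc : 1 ≤ c) (h0 : 0 ≤ n) (h4 : n < 4*c) :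
    (if PySem.Int.floordiv n c = 0 then [c, c - PySem.Int.mod n c]
     else if PySem.Int.floordiv n c = 1 then [c - PySem.Int.mod n c, 0]
     else if PySem.Int.floordiv n c = 2 then [0, PySem.Int.mod n c]
     else [PySem.Int.mod n c, c]) = [pvPosY c n, pvPosX c n] := by
  have hcpos : (0:Int) < c := by omega
  have hmod := PySem.Int.floordiv_mul_add_mod n c
  rcases lt_or_ge n c with h | h
  · have hq : PySem.Int.floordiv n c = 0 := by
      rw [PySem.Int.floordiv_eq_iff_of_pos hcpos]; constructor <;> nlinarith
    rw [hq] at hmod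
    simp only [hq]; norm_num
    unfold pvPosY pvPosX; split_ifs <;> simp_all <;> omega
  · rcases lt_or_ge n (2*c) with h2 | h2
    · have hq : PySem.Int.floordiv n c = 1 := by
        rw [PySem.Int.floordiv_eq_iff_of_pos hcpos]; constructor <;> nlinarith
      rw [hq] at hmod
      simp only [hq]; norm_num
      unfold pvPosY pvPosX; split_ifs <;> simp_all <;> omega
    · rcases lt_or_ge n (3*c) with h3 | h3
      · have hq : PySem.Int.floordiv n c = 2 := by
          rw [PySem.Int.floordiv_eq_iff_of_pos hcpos]; constructor <;> nlinarith
        rw [hq] at hmod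
        simp only [hq]; norm_num
        unfold pvPosY pvPosX; split_ifs <;> simp_all <;> omega
      · have hq : PySem.Int.floordiv n c = 3 := by
          rw [PySem.Int.floordiv_eq_iff_of_pos hcpos]; constructor <;> nlinarith
        rw [hq] at hmod
        simp only [hq]; norm_num
        unfold pvPosY pvPosX; split_ifs <;> simp_all <;> omega

lemma pvMain (edge you die : Int) (hpre : 2 ≤ edge) :
    (let cycle := edge - 1
     let st := (PySem.List.pyRange 0 (cycle * 4 - 1) 1).foldl (solutionStep cycle)
                 (cycle, cycle, [[cycle, cycle]])
     PySem.List.pyGetD st.2.2 (PySem.Int.mod (you + die) (cycle * 4)) [])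
    = (let cycle := edge - 1
       let n := PySem.Int.mod (you + die) (4 * cycle)
       let side := PySem.Int.floordiv n cycle
       let off := PySem.Int.mod n cycle
       if side = 0 then [cycle, cycle - off]
       else if side = 1 then [cycle - off, 0]
       else if side = 2 then [0, off]
       else [off, cycle]) := by
  set c : Int := edge - 1 with hcdef
  have hc : 1 ≤ c := by omega
  have hmul : c * 4 = 4 * c := by ring
  set M : Nat := (c * 4 - 1).toNat with hMdef
  have hMc : (M : Int) = c * 4 - 1 := by
    rw [hMdef]; exact Int.toNat_of_nonneg (by omega)
  simp only [hmul]
  rw [show (4 * c - 1 : Int) = (M : Int) by omega]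
  rw [pvLoop_inv c hc M (by omega)]
  set n : Int := PySem.Int.mod (you + die) (4 * c) with hndef
  have hn0 : 0 ≤ n := by
    rw [hndef, PySem.Int.mod_eq_emod_of_pos (by omega)]
    exact Int.emod_nonneg _ (by omega)
  have hn4 : n < 4 * c := by
    rw [hndef, PySem.Int.mod_eq_emod_of_pos (by omega)]
    exact Int.emod_lt_of_pos _ (by omega)
  have hlen : n < ((List.range (M+1)).map (fun j : Nat => [pvPosY c (j : Int), pvPosX c (j : Int)])).length := by
    simp; omega
  rw [show (pvPosY c (M:Int), pvPosX c (M:Int), (List.range (M+1)).map (fun j : Nat => [pvPosY c (j:Int), pvPosX c (j:Int)])).2.2 = (List.range (M+1)).map (fun j : Nat => [pvPosY c (j:Int), pvPosX c (j:Int)]) from rfl]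
  rw [PySem.List.pyGetD_eq_getElem _ _ hn0 (by simpa using hlen)]
  have hnn : ((n.toNat : Nat) : Int) = n := Int.toNat_of_nonneg hn0
  simp only [List.getElem_map, List.getElem_range, hnn]
  exact (pvAlt_eq c n hc hn0 hn4).symm

-- ===== VERDICT (by name: the statement is the Claim_ definition above) =====
theorem solution_spec : Claim_equal_solution := by
  intro edge you die _ hpre
  unfold Spec_solution solution solution_alt
  exact pvMain edge you die hpre
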